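-- pv_equiv track=rewrite | github.com/tanm-123/Sudoku-Solver | sudoku solver using python/sudoku solver.py | get_block_num
-- ===== SOURCE A (Python) =====
-- from typing import Tuple, List
--
-- def get_block_num(sudoku:List[List[int]], pos:Tuple[int, int]) -> int:
--         for i in range(1,4):
--                 for j in range(1,10):
--                         if pos[0]==i and pos[1]==j:
--                                 if int(j/3)==j/3:
--                                         return (int(j/3))
--                                 else:
--                                         return (j//3 + 1)
--         for i in range(4,7):
--                 for j in range (1,10):
--                         if pos[0]==i and pos[1]==j:
--                                 if int(j/3)==j/3:
--                                         return (int(j/3 +3))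
--                                 else:
--                                         return(j//3 + 4)
--         for i in range(7,10):
--                 for j in range (1,10):
--                         if pos[0]==i and pos[1]==j:
--                                 if int(j/3)==j/3:
--                                         return (int(j/3 +6))
--                                 else:
--                                         return(j//3 + 7)
-- ===== SOURCE B (Python) =====
-- from typing import Tuple, List
--
-- def get_block_num(sudoku: List[List[int]], pos: Tuple[int, int]) -> int:
--         r, c = pos
--         if 1 <= r <= 9 and 1 <= c <= 9:
--                 return 3 * ((r - 1) // 3) + (c - 1) // 3 + 1
--         return None
-- ===== Notes on version B (the rewrite author's own statement) =====
-- stated objective: simpler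
-- what changed: Replaced the three nested scanning loops over all 81 positions (with per-band divisibility branches) by one range guard and the closed-form formula 3*((r-1)//3) + (c-1)//3 + 1.
import Mathlib
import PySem

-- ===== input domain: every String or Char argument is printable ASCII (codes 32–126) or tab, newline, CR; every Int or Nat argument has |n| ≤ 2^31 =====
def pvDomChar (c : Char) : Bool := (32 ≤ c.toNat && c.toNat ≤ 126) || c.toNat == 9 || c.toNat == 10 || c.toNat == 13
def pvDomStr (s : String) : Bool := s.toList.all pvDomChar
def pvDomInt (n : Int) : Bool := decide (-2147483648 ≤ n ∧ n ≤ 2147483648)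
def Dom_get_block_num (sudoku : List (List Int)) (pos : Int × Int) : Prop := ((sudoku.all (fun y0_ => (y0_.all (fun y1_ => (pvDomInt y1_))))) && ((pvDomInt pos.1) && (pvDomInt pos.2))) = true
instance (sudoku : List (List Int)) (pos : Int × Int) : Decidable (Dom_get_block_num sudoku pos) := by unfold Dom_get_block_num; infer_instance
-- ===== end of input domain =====

-- B replaces A's nine scanning loops by a single range guard plus the closed-form
-- block formula; simpler, same return value (None outside the 9x9 board).

-- ===== PORT A =====
-- inner 'for j in range(…)' loop of one band: off is 0/3/6 for the three bands.
-- 'int(j/3)==j/3' holds exactly when 3 divides j (j is a small positive int here,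
-- so the float test is exact); then A returns int(j/3)+off, else j//3 + (off+1).
def gbScanJ (pos : Int × Int) (i : Int) (off : Int) : List Int → Option Int
  | [] => none
  | j :: rest =>
      if pos.1 = i ∧ pos.2 = j then
        if j % 3 = 0 then some (PySem.Int.floordiv j 3 + off)
        else some (PySem.Int.floordiv j 3 + (off + 1))
      else gbScanJ pos i off rest

-- outer 'for i in range(…)' loop of one band
def gbScanI (pos : Int × Int) (off : Int) : List Int → Option Int
  | [] => none
  | i :: rest =>
      match gbScanJ pos i off (PySem.List.pyRange 1 10 1) with
      | some v => some v
      | none => gbScanI pos off rest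

def get_block_num (_sudoku : List (List Int)) (pos : Int × Int) : Option Int :=
  match gbScanI pos 0 (PySem.List.pyRange 1 4 1) with
  | some v => some v
  | none =>
    match gbScanI pos 3 (PySem.List.pyRange 4 7 1) with
    | some v => some v
    | none =>
      match gbScanI pos 6 (PySem.List.pyRange 7 10 1) with
      | some v => some v
      | none => none

-- ===== PORT B =====
def get_block_num_alt (_sudoku : List (List Int)) (pos : Int × Int) : Option Int :=
  if 1 ≤ pos.1 ∧ pos.1 ≤ 9 ∧ 1 ≤ pos.2 ∧ pos.2 ≤ 9 then
    some (3 * PySem.Int.floordiv (pos.1 - 1) 3 + PySem.Int.floordiv (pos.2 - 1) 3 + 1)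
  else none

-- ===== PRECONDITION & SPEC =====
def Spec_get_block_num (sudoku : List (List Int)) (pos : Int × Int) (out : Option Int) : Prop := out = get_block_num_alt sudoku pos
instance (sudoku : List (List Int)) (pos : Int × Int) (out : Option Int) : Decidable (Spec_get_block_num sudoku pos out) := by unfold Spec_get_block_num; infer_instance

-- ===== CLAIM (what is proved, stated in full; the proofs are below) =====
def Claim_equal_get_block_num : Prop := ∀ (sudoku : List (List Int)) (pos : Int × Int), Dom_get_block_num sudoku pos → Spec_get_block_num sudoku pos (get_block_num sudoku pos)

-- ===== LEMMAS AND PROOFS =====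

theorem gbScanJ_none (r c i off : Int) (l : List Int) (h : r ≠ i ∨ c ∉ l) :
    gbScanJ (r, c) i off l = none := by
  induction l with
  | nil => rfl
  | cons j rest ih =>
    simp only [gbScanJ]
    rw [if_neg, ih]
    · rcases h with h | h
      · exact Or.inl h
      · exact Or.inr (fun hm => h (List.mem_cons_of_mem _ hm))
    · rcases h with h | h
      · exact fun hc => h hc.1
      · exact fun hc => h (hc.2 ▸ List.mem_cons_self ..)

theorem gbScanI_none (r c off : Int) (l : List Int)
    (h : ∀ i ∈ l, gbScanJ (r, c) i off (PySem.List.pyRange 1 10 1) = none) :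
    gbScanI (r, c) off l = none := by
  induction l with
  | nil => rfl
  | cons i rest ih =>
    simp only [gbScanI, h i (List.mem_cons_self ..)]
    exact ih fun i hi => h i (List.mem_cons_of_mem _ hi)

theorem rangeJ : PySem.List.pyRange 1 10 1 = ([1,2,3,4,5,6,7,8,9] : List Int) := by decide

-- ===== VERDICT (by name: the statement is the Claim_ definition above) =====
theorem get_block_num_spec : Claim_equal_get_block_num := by
  intro sudoku pos _
  obtain ⟨r, c⟩ := pos
  unfold Spec_get_block_num
  by_cases hb : 1 ≤ r ∧ r ≤ 9 ∧ 1 ≤ c ∧ c ≤ 9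
  · obtain ⟨h1, h2, h3, h4⟩ := hb
    interval_cases r <;> interval_cases c <;> rfl
  · have halt : get_block_num_alt sudoku (r, c) = none := by
      simp only [get_block_num_alt, if_neg hb]
    rw [halt]
    by_cases hc : 1 ≤ c ∧ c ≤ 9
    · -- r must be out of 1..9
      have hr : ¬ (1 ≤ r ∧ r ≤ 9) := fun h => hb ⟨h.1, h.2, hc.1, hc.2⟩
      have key : ∀ (off : Int) (l : List Int), (∀ i ∈ l, 1 ≤ i ∧ i ≤ 9) →
          gbScanI (r, c) off l = none := by
        intro off l hl
        exact gbScanI_none _ _ _ _ fun i hi =>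
          gbScanJ_none _ _ _ _ _ (Or.inl (by have := hl i hi; omega))
      simp only [get_block_num,
        key 0 (PySem.List.pyRange 1 4 1) (by decide),
        key 3 (PySem.List.pyRange 4 7 1) (by decide),
        key 6 (PySem.List.pyRange 7 10 1) (by decide)]
    · -- c out of 1..9: c not in the inner range, every inner scan is none
      have hcm : c ∉ PySem.List.pyRange 1 10 1 := by
        rw [rangeJ]; intro hm; fin_cases hm <;> omega
      have key : ∀ (off : Int) (l : List Int), gbScanI (r, c) off l = none :=
        fun off l => gbScanI_none _ _ _ _ fun i _ =>
          gbScanJ_none _ _ _ _ _ (Or.inr hcm)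
      simp only [get_block_num, key]
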